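-- pv_equiv track=rewrite | github.com/ALOHAALOHAALOJHA/FARFAN_MCDPP | scripts/map_consumers_by_stage.py | _matrix_consumers_by_scope
-- ===== SOURCE A (Python) =====
-- from collections import defaultdict
-- from typing import Any, Dict, Iterable, List, Set, Tuple
--
-- def _matrix_consumers_by_scope(matrix_rows: List[Dict[str, str]]) -> Dict[str, List[str]]:
--     by_scope: Dict[str, Set[str]] = defaultdict(set)
--     for row in matrix_rows:
--         scope = row.get("consumer_scope", "") or ""
--         consumer = row.get("consumer", "") or ""
--         if not scope:
--             continue
--         if consumer:
--             by_scope[scope].add(consumer)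
--     return {k: sorted(v) for k, v in by_scope.items()}
-- ===== SOURCE B (Python) =====
-- def _matrix_consumers_by_scope(matrix_rows):
--     pairs = [
--         (scope, consumer)
--         for scope, consumer in (
--             (row.get("consumer_scope") or "", row.get("consumer") or "")
--             for row in matrix_rows
--         )
--         if scope and consumer
--     ]
--     # keys in first-appearance order; buckets filled from the globally sorted
--     # pair list, dropping consecutive duplicate consumers
--     result = {scope: [] for scope, _ in pairs}
--     for scope, consumer in sorted(pairs):
--         bucket = result[scope]
--         if not bucket or bucket[-1] != consumer:
--             bucket.append(consumer)
--     return result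
-- ===== Notes on version B (the rewrite author's own statement) =====
-- stated objective: alternative
-- what changed: A groups consumers into a defaultdict of per-scope sets and then sorts each set; B builds one flat filtered (scope, consumer) pair list, sorts it once globally, and fills each scope's bucket in a single pass over the sorted pairs, dropping consecutive duplicate consumers instead of using sets.
import Mathlib
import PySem

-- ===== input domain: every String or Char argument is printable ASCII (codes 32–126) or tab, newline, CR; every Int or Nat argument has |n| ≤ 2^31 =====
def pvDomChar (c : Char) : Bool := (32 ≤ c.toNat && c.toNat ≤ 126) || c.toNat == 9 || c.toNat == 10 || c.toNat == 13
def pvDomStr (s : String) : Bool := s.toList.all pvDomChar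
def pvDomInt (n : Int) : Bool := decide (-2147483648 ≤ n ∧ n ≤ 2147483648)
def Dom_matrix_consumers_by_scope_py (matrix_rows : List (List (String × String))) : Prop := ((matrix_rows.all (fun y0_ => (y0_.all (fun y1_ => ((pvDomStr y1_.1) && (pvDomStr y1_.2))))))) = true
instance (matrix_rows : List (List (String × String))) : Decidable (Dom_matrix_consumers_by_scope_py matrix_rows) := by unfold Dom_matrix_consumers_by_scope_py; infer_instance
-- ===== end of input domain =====

-- B replaces A's defaultdict-of-sets (per-scope set insertion, then one sort per scope) by one
-- globally sorted flat pair list filled into first-seen-order buckets with adjacent dedup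
-- (objective: alternative).

-- ===== PORT A =====
def matrix_consumers_by_scope_py (matrix_rows : List (List (String × String))) : List (String × List String) :=
  let by_scope : PySem.Dict String (PySem.Set String) :=
    matrix_rows.foldl (fun d row =>
      let scope0 := PySem.Dict.getD (PySem.Dict.mk row) "consumer_scope" ""
      let scope := if scope0 = "" then "" else scope0          -- `row.get(...) or ""`
      let consumer0 := PySem.Dict.getD (PySem.Dict.mk row) "consumer" ""
      let consumer := if consumer0 = "" then "" else consumer0 -- `row.get(...) or ""`
      if scope = "" then d
      else if consumer ≠ "" then
        d.modify scope PySem.Set.empty (fun s => PySem.Set.add s consumer)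
      else d) PySem.Dict.empty
  by_scope.items.map (fun kv => (kv.1, PySem.List.sorted kv.2 (fun x => x)))

-- ===== PORT B =====
-- the body of B's fill loop: `bucket = result[scope]; if not bucket or bucket[-1] != consumer:
-- bucket.append(consumer)`; the key is always present (every scope was seeded), so getD is exact,
-- and `bucket[-1]` of a nonempty list is its last element
def fillStep (d : PySem.Dict String (List String)) (p : String × String) : PySem.Dict String (List String) :=
  if d.getD p.1 [] = [] || (d.getD p.1 []).getLast? != some p.2 then
    d.insert p.1 (d.getD p.1 [] ++ [p.2])
  else d

def matrix_consumers_by_scope_py_alt (matrix_rows : List (List (String × String))) : List (String × List String) :=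
  let pairs : List (String × String) :=
    (matrix_rows.map (fun row =>
      (PySem.Dict.getD (PySem.Dict.mk row) "consumer_scope" "",
       PySem.Dict.getD (PySem.Dict.mk row) "consumer" ""))).filter
      (fun p => p.1 != "" && p.2 != "")
  let result0 : PySem.Dict String (List String) :=
    pairs.foldl (fun d p => d.insert p.1 []) PySem.Dict.empty       -- {scope: [] for scope, _ in pairs}
  let result := (PySem.List.sorted2 pairs (fun p => p.1) (fun p => p.2)).foldl fillStep result0
  result.items

-- ===== PRECONDITION & SPEC =====
def Spec_matrix_consumers_by_scope_py (matrix_rows : List (List (String × String))) (out : List (String × List String)) : Prop := out = matrix_consumers_by_scope_py_alt matrix_rows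
instance (matrix_rows : List (List (String × String))) (out : List (String × List String)) : Decidable (Spec_matrix_consumers_by_scope_py matrix_rows out) := by unfold Spec_matrix_consumers_by_scope_py; infer_instance

-- ===== CLAIM (what is proved, stated in full; the proofs are below) =====
def Claim_equal_matrix_consumers_by_scope_py : Prop := ∀ (matrix_rows : List (List (String × String))), Dom_matrix_consumers_by_scope_py matrix_rows → Spec_matrix_consumers_by_scope_py matrix_rows (matrix_consumers_by_scope_py matrix_rows)

-- ===== LEMMAS AND PROOFS =====

-- the normalized (scope, consumer) pair of a row, and the filtered pair list both sides share
def pvPair (row : List (String × String)) : String × String :=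
  (PySem.Dict.getD (PySem.Dict.mk row) "consumer_scope" "",
   PySem.Dict.getD (PySem.Dict.mk row) "consumer" "")

def pvPairs (matrix_rows : List (List (String × String))) : List (String × String) :=
  (matrix_rows.map pvPair).filter (fun p => p.1 != "" && p.2 != "")

def pvStepA (d : PySem.Dict String (PySem.Set String)) (p : String × String) : PySem.Dict String (PySem.Set String) :=
  d.modify p.1 PySem.Set.empty (fun s => PySem.Set.add s p.2)

-- adjacent-duplicate removal: what the fill loop does to each bucket
def dedupAdj : List String → List String
  | [] => []
  | [x] => [x]
  | x :: y :: rest => if x = y then dedupAdj (y :: rest) else x :: dedupAdj (y :: rest)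

-- the fill loop's action on a single bucket
def pvApp (b : List String) (c : String) : List String :=
  if b = [] || b.getLast? != some c then b ++ [c] else b

@[simp] theorem pv_or_empty (s : String) : (if s = "" then "" else s) = s := by
  split <;> simp_all

-- A's row loop is the pvStepA fold over the filtered pair list
theorem pv_foldA (rows : List (List (String × String))) (d : PySem.Dict String (PySem.Set String)) :
    rows.foldl (fun d row =>
      let scope0 := PySem.Dict.getD (PySem.Dict.mk row) "consumer_scope" ""
      let scope := if scope0 = "" then "" else scope0
      let consumer0 := PySem.Dict.getD (PySem.Dict.mk row) "consumer" ""
      let consumer := if consumer0 = "" then "" else consumer0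
      if scope = "" then d
      else if consumer ≠ "" then
        d.modify scope PySem.Set.empty (fun s => PySem.Set.add s consumer)
      else d) d
    = (pvPairs rows).foldl pvStepA d := by
  induction rows generalizing d with
  | nil => simp [pvPairs]
  | cons row rows ih =>
    simp only [List.foldl_cons, pvPairs, List.map_cons, List.filter_cons]
    rw [ih]
    by_cases hs : PySem.Dict.getD (PySem.Dict.mk row) "consumer_scope" "" = ""
    · simp [pvPair, pvPairs, hs]
    · by_cases hc : PySem.Dict.getD (PySem.Dict.mk row) "consumer" "" = ""
      · simp [pvPair, pvPairs, hs, hc]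
      · simp [pvPair, pvPairs, hs, hc, pvStepA]

theorem pv_getD_foldA (Q : List (String × String)) (d : PySem.Dict String (PySem.Set String)) (k : String) :
    (Q.foldl pvStepA d).getD k PySem.Set.empty
      = ((Q.filter (fun q => q.1 == k)).map (fun q => q.2)).foldl PySem.Set.add (d.getD k PySem.Set.empty) := by
  induction Q generalizing d with
  | nil => simp
  | cons p Q ih =>
    simp only [List.foldl_cons, List.filter_cons]
    rw [ih]
    by_cases hk : p.1 = k
    · subst hk
      simp [pvStepA, PySem.Dict.getD_modify_self]
    · have hbk : (p.1 == k) = false := by simp [hk]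
      have hne : k ≠ p.1 := fun h => hk h.symm
      have hstep : (pvStepA d p).getD k PySem.Set.empty = d.getD k PySem.Set.empty := by
        simp only [pvStepA]
        exact PySem.Dict.getD_modify_of_ne d PySem.Set.empty _ hne
      simp only [hbk, Bool.false_eq_true, if_false]
      rw [hstep]

theorem pv_mem_dedupAdj : ∀ (xs : List String) (a : String), a ∈ dedupAdj xs ↔ a ∈ xs
  | [], a => by simp [dedupAdj]
  | [x], a => by simp [dedupAdj]
  | x :: y :: rest, a => by
    simp only [dedupAdj]
    by_cases hxy : x = y
    · subst hxy
      rw [if_pos rfl, pv_mem_dedupAdj (x :: rest) a]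
      simp only [List.mem_cons]
      tauto
    · rw [if_neg hxy]
      simp only [List.mem_cons, pv_mem_dedupAdj (y :: rest) a]

theorem pv_pairwise_dedupAdj : ∀ (xs : List String), xs.Pairwise (· ≤ ·) → (dedupAdj xs).Pairwise (· < ·)
  | [], _ => by simp [dedupAdj]
  | [x], _ => by simp [dedupAdj]
  | x :: y :: rest, h => by
    have h' : (y :: rest).Pairwise (· ≤ ·) := (List.pairwise_cons.1 h).2
    simp only [dedupAdj]
    by_cases hxy : x = y
    · rw [if_pos hxy]; exact pv_pairwise_dedupAdj (y :: rest) h'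
    · rw [if_neg hxy]
      refine List.pairwise_cons.2 ⟨?_, pv_pairwise_dedupAdj (y :: rest) h'⟩
      intro z hz
      have hzmem : z ∈ y :: rest := (pv_mem_dedupAdj _ z).1 hz
      have hxley : x ≤ y := (List.pairwise_cons.1 h).1 y (by simp)
      have hyz : y ≤ z := by
        rcases List.mem_cons.1 hzmem with rfl | hzr
        · exact le_refl _
        · exact List.rel_of_pairwise_cons h' hzr
      exact lt_of_lt_of_le (lt_of_le_of_ne hxley hxy) hyz

-- sorted(set(cs)) = adjacent-dedup(sorted(cs))
theorem pv_sorted_set_eq_dedupAdj_sorted (cs : List String) :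
    PySem.List.sorted (PySem.Set.ofList cs) (fun x => x) = dedupAdj (PySem.List.sorted cs (fun x => x)) := by
  have hpw : (dedupAdj (PySem.List.sorted cs (fun x => x))).Pairwise (· < ·) :=
    pv_pairwise_dedupAdj _ (PySem.List.sorted_pairwise cs (fun x => x))
  apply PySem.List.sorted_eq_of_perm_of_pairwise_lt
  · rw [List.perm_ext_iff_of_nodup (hpw.imp (fun hab => ne_of_lt hab)) (PySem.Set.nodup_ofList cs)]
    intro a
    rw [pv_mem_dedupAdj, PySem.List.mem_sorted, PySem.Set.mem_ofList]
  · exact hpw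

-- the fill loop's bucket action, shifted past a settled prefix
theorem pv_fold_shift : ∀ (cs : List String) (acc : List String) (x : String),
    (cs.foldl pvApp (acc ++ [x])) = acc ++ cs.foldl pvApp [x]
  | [], acc, x => by simp
  | c :: cs, acc, x => by
    simp only [List.foldl_cons]
    by_cases hxc : x = c
    · have h1 : pvApp (acc ++ [x]) c = acc ++ [x] := by
        simp [pvApp, hxc]
      have h2 : pvApp [x] c = [x] := by simp [pvApp, hxc]
      rw [h1, h2, pv_fold_shift cs acc x]
    · have h1 : pvApp (acc ++ [x]) c = (acc ++ [x]) ++ [c] := by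
        simp [pvApp, hxc]
      have h2 : pvApp [x] c = [x] ++ [c] := by simp [pvApp, hxc]
      rw [h1, h2, pv_fold_shift cs (acc ++ [x]) c, List.append_assoc]
      congr 1
      exact (pv_fold_shift cs [x] c).symm

theorem pv_fold_dedup : ∀ (cs : List String) (x : String),
    cs.foldl pvApp [x] = dedupAdj (x :: cs)
  | [], x => by simp [dedupAdj]
  | c :: cs, x => by
    simp only [List.foldl_cons]
    by_cases hxc : x = c
    · have h2 : pvApp [x] c = [x] := by simp [pvApp, hxc]
      rw [h2, pv_fold_dedup cs x]
      simp [dedupAdj, hxc]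
    · have h2 : pvApp [x] c = [x] ++ [c] := by simp [pvApp, hxc]
      rw [h2, pv_fold_shift cs [x] c, pv_fold_dedup cs c]
      simp [dedupAdj, hxc]

theorem pv_foldApp_nil : ∀ (cs : List String), cs.foldl pvApp [] = dedupAdj cs
  | [] => rfl
  | c :: cs => by
    have h : pvApp [] c = [c] := by simp [pvApp]
    simp only [List.foldl_cons, h]
    exact pv_fold_dedup cs c

-- the seeding loop leaves every bucket empty
theorem pv_getD_seed (l : List (String × String)) (d : PySem.Dict String (List String)) (k : String)
    (hd : d.getD k [] = []) :
    (l.foldl (fun d p => d.insert p.1 ([] : List String)) d).getD k [] = [] := by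
  induction l generalizing d with
  | nil => simpa using hd
  | cons p l ih =>
    simp only [List.foldl_cons]
    apply ih
    rw [PySem.Dict.getD_insert]
    split <;> simp [hd]

-- the fill loop never adds keys
theorem pv_keys_fill (l : List (String × String)) (d : PySem.Dict String (List String))
    (h : ∀ p ∈ l, d.contains p.1 = true) :
    (l.foldl fillStep d).keys = d.keys := by
  induction l generalizing d with
  | nil => rfl
  | cons p l ih =>
    simp only [List.foldl_cons]
    have hkeys : (fillStep d p).keys = d.keys := by
      unfold fillStep
      split
      · exact PySem.Dict.keys_insert_of_contains d _ (h p (by simp))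
      · rfl
    rw [ih _ ?_, hkeys]
    intro q hq
    unfold fillStep
    split
    · rw [PySem.Dict.contains_insert]
      simp [h q (List.mem_cons_of_mem _ hq)]
    · exact h q (List.mem_cons_of_mem _ hq)

-- the fill fold at key k is the bucket fold over k's consumers
theorem pv_getD_fill (l : List (String × String)) (d : PySem.Dict String (List String)) (k : String) :
    (l.foldl fillStep d).getD k []
      = ((l.filter (fun q => q.1 == k)).map (fun q => q.2)).foldl pvApp (d.getD k []) := by
  induction l generalizing d with
  | nil => simp
  | cons p l ih =>
    simp only [List.foldl_cons, List.filter_cons]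
    rw [ih]
    by_cases hk : p.1 = k
    · subst hk
      have hstep : (fillStep d p).getD p.1 [] = pvApp (d.getD p.1 []) p.2 := by
        unfold fillStep pvApp
        split
        · rw [PySem.Dict.getD_insert_self]
        · rfl
      simp only [BEq.rfl, if_true, List.map_cons, List.foldl_cons, hstep]
    · have hbk : (p.1 == k) = false := by simp [hk]
      have hne : k ≠ p.1 := fun h => hk h.symm
      have hstep : (fillStep d p).getD k [] = d.getD k [] := by
        unfold fillStep
        split
        · exact PySem.Dict.getD_insert_of_ne d _ _ hne
        · rfl
      simp only [hbk, Bool.false_eq_true, if_false]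
      rw [hstep]

-- lexicographic ≤ on pairs of strings: the order sorted(pairs) produces
def pvLexLe (p q : String × String) : Prop := p.1 < q.1 ∨ (p.1 = q.1 ∧ p.2 ≤ q.2)

theorem pvLexLe_trans {p q r : String × String} (h1 : pvLexLe p q) (h2 : pvLexLe q r) : pvLexLe p r := by
  rcases h1 with h1 | ⟨h1, h1'⟩ <;> rcases h2 with h2 | ⟨h2, h2'⟩
  · exact Or.inl (lt_trans h1 h2)
  · exact Or.inl (h2 ▸ h1)
  · exact Or.inl (h1 ▸ h2)
  · exact Or.inr ⟨h1.trans h2, le_trans h1' h2'⟩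

def pvBefore (a b : String × String) : Bool :=
  decide (a.1 < b.1) || (!decide (b.1 < a.1) && decide (a.2 < b.2))

theorem pv_before_le {a b : String × String} (h : pvBefore a b = true) : pvLexLe a b := by
  unfold pvBefore at h
  simp only [Bool.or_eq_true, Bool.and_eq_true, Bool.not_eq_true', decide_eq_true_eq,
    decide_eq_false_iff_not] at h
  rcases h with h | ⟨h1, h2⟩
  · exact Or.inl h
  · rcases lt_or_ge a.1 b.1 with hlt | hge
    · exact Or.inl hlt
    · exact Or.inr ⟨le_antisymm (le_of_not_gt h1) hge, le_of_lt h2⟩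

theorem pv_not_before_le {a b : String × String} (h : pvBefore a b = false) : pvLexLe b a := by
  unfold pvBefore at h
  rw [Bool.or_eq_false_iff, Bool.and_eq_false_iff] at h
  obtain ⟨h1, h2⟩ := h
  have h1' : ¬ a.1 < b.1 := by simpa using h1
  rcases h2 with h2 | h2
  · exact Or.inl (by simpa using h2)
  · have h2' : ¬ a.2 < b.2 := by simpa using h2
    by_cases hlt : b.1 < a.1
    · exact Or.inl hlt
    · exact Or.inr ⟨le_antisymm (not_lt.1 h1') (not_lt.1 hlt), not_lt.1 h2'⟩

theorem pv_insertBy_pairwise (x : String × String) (ys : List (String × String))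
    (h : ys.Pairwise pvLexLe) :
    (PySem.List.insertBy pvBefore x ys).Pairwise pvLexLe := by
  induction ys with
  | nil => simp [PySem.List.insertBy]
  | cons y ys ih =>
    rw [List.pairwise_cons] at h
    obtain ⟨hy, hys⟩ := h
    show (PySem.List.insertBy pvBefore x (y :: ys)).Pairwise pvLexLe
    rw [show PySem.List.insertBy pvBefore x (y :: ys)
        = if pvBefore x y = true then x :: y :: ys else y :: PySem.List.insertBy pvBefore x ys from rfl]
    split
    · rename_i hb
      refine List.pairwise_cons.2 ⟨?_, List.pairwise_cons.2 ⟨hy, hys⟩⟩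
      intro z hz
      rcases List.mem_cons.1 hz with rfl | hzys
      · exact pv_before_le hb
      · exact pvLexLe_trans (pv_before_le hb) (hy z hzys)
    · rename_i hb
      refine List.pairwise_cons.2 ⟨?_, ih hys⟩
      intro z hz
      rcases (PySem.List.insertBy_mem_iff pvBefore x z ys).1 hz with rfl | hzys
      · exact pv_not_before_le (by simpa using hb)
      · exact hy z hzys

theorem pv_sorted2_pairwise (xs : List (String × String)) :
    (PySem.List.sorted2 xs (fun p => p.1) (fun p => p.2)).Pairwise pvLexLe := by
  have hrw : PySem.List.sorted2 xs (fun p => p.1) (fun p => p.2)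
      = xs.foldl (fun acc x => PySem.List.insertBy pvBefore x acc) [] := rfl
  rw [hrw]
  have : ∀ (l : List (String × String)) (acc : List (String × String)), acc.Pairwise pvLexLe →
      (l.foldl (fun acc x => PySem.List.insertBy pvBefore x acc) acc).Pairwise pvLexLe := by
    intro l
    induction l with
    | nil => intro acc h; simpa using h
    | cons x l ih =>
      intro acc h
      exact ih _ (pv_insertBy_pairwise x acc h)
  exact this xs [] (by simp)

-- k's consumers, read off the globally sorted pair list, are sorted(k's consumers)
theorem pv_seconds_sorted (Q : List (String × String)) (k : String) :
    PySem.List.sorted ((Q.filter (fun q => q.1 == k)).map (fun q => q.2)) (fun x => x)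
      = (((PySem.List.sorted2 Q (fun p => p.1) (fun p => p.2)).filter (fun q => q.1 == k)).map (fun q => q.2)) := by
  apply PySem.List.sorted_id_eq_of_perm_of_pairwise
  · exact (((PySem.List.sorted2_perm Q _ _ false).filter _).map _)
  · have hpw := (pv_sorted2_pairwise Q).filter (fun q => q.1 == k)
    rw [List.pairwise_map]
    refine List.Pairwise.imp_of_mem ?_ hpw
    intro a b ha hb hab
    have hak : a.1 = k := by simpa using (List.of_mem_filter ha)
    have hbk : b.1 = k := by simpa using (List.of_mem_filter hb)
    rcases hab with h | ⟨_, h⟩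
    · rw [hak, hbk] at h; exact absurd h (lt_irrefl k)
    · exact h

-- ===== VERDICT (by name: the statement is the Claim_ definition above) =====
theorem matrix_consumers_by_scope_py_spec : Claim_equal_matrix_consumers_by_scope_py := by
  intro rows _
  show matrix_consumers_by_scope_py rows = matrix_consumers_by_scope_py_alt rows
  have hA : matrix_consumers_by_scope_py rows
      = ((pvPairs rows).foldl pvStepA PySem.Dict.empty).items.map
          (fun kv => (kv.1, PySem.List.sorted kv.2 (fun x => x))) := by
    unfold matrix_consumers_by_scope_py
    rw [pv_foldA]
  have hB : matrix_consumers_by_scope_py_alt rows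
      = ((PySem.List.sorted2 (pvPairs rows) (fun p => p.1) (fun p => p.2)).foldl fillStep
          ((pvPairs rows).foldl (fun d p => d.insert p.1 ([] : List String)) PySem.Dict.empty)).items := rfl
  rw [hA, hB]
  -- keys of both dictionaries
  have hkA : ((pvPairs rows).foldl pvStepA PySem.Dict.empty).keys
      = PySem.Set.ofList ((pvPairs rows).map (fun q => q.1)) := by
    have h := PySem.Dict.keys_foldl_modify_key (pvPairs rows) (fun q => q.1) PySem.Set.empty
      (fun _ p => fun s => PySem.Set.add s p.2) PySem.Dict.empty
    simpa [PySem.Dict.keys_empty, PySem.Set.update_nil_left, pvStepA] using h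
  have hk0 : ((pvPairs rows).foldl (fun d p => d.insert p.1 ([] : List String)) PySem.Dict.empty).keys
      = PySem.Set.ofList ((pvPairs rows).map (fun q => q.1)) := by
    have h := PySem.Dict.keys_foldl_insert_key (pvPairs rows) (fun q => q.1)
      (fun _ _ => ([] : List String)) PySem.Dict.empty
    simpa [PySem.Dict.keys_empty, PySem.Set.update_nil_left] using h
  have hall : ∀ p ∈ PySem.List.sorted2 (pvPairs rows) (fun p => p.1) (fun p => p.2),
      ((pvPairs rows).foldl (fun d p => d.insert p.1 ([] : List String)) PySem.Dict.empty).contains p.1 = true := by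
    intro p hp
    have hp' : p ∈ pvPairs rows := (PySem.List.sorted2_perm (pvPairs rows) _ _ false).mem_iff.1 hp
    rw [PySem.Dict.contains_iff_mem_keys, hk0, PySem.Set.mem_ofList] 
    exact List.mem_map_of_mem hp'
  have hkB : ((PySem.List.sorted2 (pvPairs rows) (fun p => p.1) (fun p => p.2)).foldl fillStep
        ((pvPairs rows).foldl (fun d p => d.insert p.1 ([] : List String)) PySem.Dict.empty)).keys
      = PySem.Set.ofList ((pvPairs rows).map (fun q => q.1)) := by
    rw [pv_keys_fill _ _ hall, hk0]
  have hndA : ((pvPairs rows).foldl pvStepA PySem.Dict.empty).keys.Nodup := by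
    rw [hkA]; exact PySem.Set.nodup_ofList _
  have hndB : ((PySem.List.sorted2 (pvPairs rows) (fun p => p.1) (fun p => p.2)).foldl fillStep
        ((pvPairs rows).foldl (fun d p => d.insert p.1 ([] : List String)) PySem.Dict.empty)).keys.Nodup := by
    rw [hkB]; exact PySem.Set.nodup_ofList _
  rw [PySem.Dict.items_eq_map_keys _ hndA PySem.Set.empty,
    PySem.Dict.items_eq_map_keys _ hndB [], hkA, hkB, List.map_map]
  apply List.map_congr_left
  intro k hk
  simp only [Function.comp]
  refine Prod.ext rfl ?_
  show PySem.List.sorted (((pvPairs rows).foldl pvStepA PySem.Dict.empty).getD k PySem.Set.empty) (fun x => x) = _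
  rw [pv_getD_foldA, pv_getD_fill, pv_getD_seed _ _ _ (by simp [PySem.Dict.getD_empty]),
    pv_foldApp_nil, PySem.Dict.getD_empty]
  rw [show (PySem.Set.empty : PySem.Set String) = ([] : List String) from rfl,
    ← PySem.Set.ofList_eq_foldl]
  rw [pv_sorted_set_eq_dedupAdj_sorted, pv_seconds_sorted]
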